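-- pv_equiv track=rewrite | github.com/alexrecarey/khepri-f2f | src/python/f2f.py | face_to_face_result
-- ===== SOURCE A (Python) =====
-- def face_to_face_result(outcomes):
--     result = {
--         'active': 0,
--         'fail': 0,
--         'reactive': 0,
--         'total_rolls': 0
--     }
--     for outcome, amount in outcomes.items():
--         result['total_rolls'] += amount
--         squash = outcome[0] + outcome[1] - outcome[2] - outcome[3]
--         # check if failure result
--         if squash == 0:
--             result['fail'] += amount
--         # Player A wins F2F
--         elif squash > 0:
--             result['active'] += amount
--         # Player B wins F2F
--         elif squash < 0:
--             result['reactive'] += amount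
--     return result
-- ===== SOURCE B (Python) =====
-- def face_to_face_result(outcomes):
--     # Divide-and-conquer: summarize halves into (active, fail, reactive, total)
--     # tuples and merge by componentwise addition; valid because the summary is
--     # a fold over a commutative monoid, so the tree shape does not matter.
--     def solve(items):
--         if len(items) == 0:
--             return (0, 0, 0, 0)
--         if len(items) == 1:
--             outcome, amount = items[0]
--             squash = outcome[0] + outcome[1] - outcome[2] - outcome[3]
--             return (amount if squash > 0 else 0,
--                     amount if squash == 0 else 0,
--                     amount if squash < 0 else 0,
--                     amount)
--         mid = len(items) // 2
--         la, lf, lr, lt = solve(items[:mid])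
--         ra, rf, rr, rt = solve(items[mid:])
--         return (la + ra, lf + rf, lr + rr, lt + rt)
--
--     active, fail, reactive, total_rolls = solve(list(outcomes.items()))
--     return {'active': active, 'fail': fail, 'reactive': reactive,
--             'total_rolls': total_rolls}
-- ===== Notes on version B (the rewrite author's own statement) =====
-- stated objective: alternative
-- what changed: Replaces A's single left-to-right pass that mutates a result dict by a recursive divide-and-conquer reduction: each half of the item list is summarized into an (active, fail, reactive, total) tuple and the summaries are merged by componentwise addition.
import Mathlib
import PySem

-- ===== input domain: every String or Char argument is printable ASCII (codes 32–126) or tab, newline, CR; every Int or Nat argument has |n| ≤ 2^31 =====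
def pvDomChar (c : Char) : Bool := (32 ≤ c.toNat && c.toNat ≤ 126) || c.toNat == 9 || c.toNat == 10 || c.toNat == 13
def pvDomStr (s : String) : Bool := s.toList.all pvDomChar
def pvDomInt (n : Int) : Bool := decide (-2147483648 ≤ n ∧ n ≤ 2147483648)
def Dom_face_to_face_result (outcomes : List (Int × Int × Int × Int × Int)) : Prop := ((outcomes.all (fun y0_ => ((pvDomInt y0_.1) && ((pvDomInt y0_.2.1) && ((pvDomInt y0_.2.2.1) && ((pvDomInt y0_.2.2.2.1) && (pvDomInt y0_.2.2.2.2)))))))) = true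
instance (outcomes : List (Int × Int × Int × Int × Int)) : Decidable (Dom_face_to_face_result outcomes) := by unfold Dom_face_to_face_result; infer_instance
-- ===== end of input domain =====

-- B replaces A's single left-to-right pass mutating a result dict by a recursive
-- divide-and-conquer reduction into (active, fail, reactive, total) summary tuples
-- merged by componentwise addition (objective: alternative).

-- ===== PORT A =====
-- one iteration of A's loop body over the result dict
def pvStepA (d : PySem.Dict String Int) (x : Int × Int × Int × Int × Int) : PySem.Dict String Int :=
  let amount := x.2.2.2.2
  let d := d.modify "total_rolls" 0 (· + amount)
  let squash := x.1 + x.2.1 - x.2.2.1 - x.2.2.2.1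
  if squash = 0 then d.modify "fail" 0 (· + amount)
  else if squash > 0 then d.modify "active" 0 (· + amount)
  else if squash < 0 then d.modify "reactive" 0 (· + amount)
  else d

def face_to_face_result (outcomes : List (Int × Int × Int × Int × Int)) : List (String × Int) :=
  (outcomes.foldl pvStepA
    (PySem.Dict.ofList [("active", 0), ("fail", 0), ("reactive", 0), ("total_rolls", 0)])).items

-- ===== PORT B =====
-- B's recursive 'solve': summarize a sublist into (active, fail, reactive, total)
def pvSolve (items : List (Int × Int × Int × Int × Int)) : Int × Int × Int × Int :=
  if items.length ≤ 1 then
    match items with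
    | [] => (0, 0, 0, 0)
    | x :: _ =>
      let squash := x.1 + x.2.1 - x.2.2.1 - x.2.2.2.1
      let amount := x.2.2.2.2
      ((if squash > 0 then amount else 0),
       (if squash = 0 then amount else 0),
       (if squash < 0 then amount else 0),
       amount)
  else
    let mid := items.length / 2
    let l := pvSolve (items.take mid)
    let r := pvSolve (items.drop mid)
    (l.1 + r.1, l.2.1 + r.2.1, l.2.2.1 + r.2.2.1, l.2.2.2 + r.2.2.2)
termination_by items.length
decreasing_by
  · simp only [List.length_take]; omega
  · simp only [List.length_drop]; omega

def face_to_face_result_alt (outcomes : List (Int × Int × Int × Int × Int)) : List (String × Int) :=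
  let q := pvSolve outcomes
  [("active", q.1), ("fail", q.2.1), ("reactive", q.2.2.1), ("total_rolls", q.2.2.2)]

-- ===== PRECONDITION & SPEC =====
def Spec_face_to_face_result (outcomes : List (Int × Int × Int × Int × Int)) (out : List (String × Int)) : Prop := out = face_to_face_result_alt outcomes
instance (outcomes : List (Int × Int × Int × Int × Int)) (out : List (String × Int)) : Decidable (Spec_face_to_face_result outcomes out) := by unfold Spec_face_to_face_result; infer_instance

-- ===== CLAIM (what is proved, stated in full; the proofs are below) =====
def Claim_equal_face_to_face_result : Prop := ∀ (outcomes : List (Int × Int × Int × Int × Int)), Dom_face_to_face_result outcomes → Spec_face_to_face_result outcomes (face_to_face_result outcomes)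

-- ===== LEMMAS AND PROOFS =====
def pvSquash (x : Int × Int × Int × Int × Int) : Int := x.1 + x.2.1 - x.2.2.1 - x.2.2.2.1

-- the "specification" summary of a list: the four filtered sums
def pvQuad (xs : List (Int × Int × Int × Int × Int)) : Int × Int × Int × Int :=
  (((xs.filter (fun x => pvSquash x > 0)).map (·.2.2.2.2)).sum,
   ((xs.filter (fun x => pvSquash x = 0)).map (·.2.2.2.2)).sum,
   ((xs.filter (fun x => pvSquash x < 0)).map (·.2.2.2.2)).sum,
   (xs.map (·.2.2.2.2)).sum)

theorem pvQuad_append (l r : List (Int × Int × Int × Int × Int)) :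
    pvQuad (l ++ r) = ((pvQuad l).1 + (pvQuad r).1, (pvQuad l).2.1 + (pvQuad r).2.1,
      (pvQuad l).2.2.1 + (pvQuad r).2.2.1, (pvQuad l).2.2.2 + (pvQuad r).2.2.2) := by
  simp [pvQuad, List.filter_append]

theorem pvSolve_eq_quad (xs : List (Int × Int × Int × Int × Int)) :
    pvSolve xs = pvQuad xs := by
  induction hn : xs.length using Nat.strong_induction_on generalizing xs with
  | _ n ih =>
    by_cases h : xs.length ≤ 1
    · match xs with
      | [] => simp [pvSolve, pvQuad]
      | [x] =>
        rw [pvSolve, if_pos h]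
        simp only [pvQuad, pvSquash, List.filter, List.map, List.sum]
        rcases lt_trichotomy (x.1 + x.2.1 - x.2.2.1 - x.2.2.2.1) 0 with hs | hs | hs
        · rw [if_neg (by omega), if_neg (by omega), if_pos hs]
          simp [show ¬(x.2.2.2.1 < x.1 + x.2.1 - x.2.2.1) from by omega,
                show x.1 + x.2.1 - x.2.2.1 < x.2.2.2.1 from by omega,
                show x.1 + x.2.1 - x.2.2.1 - x.2.2.2.1 ≠ 0 from by omega]
        · rw [if_neg (by omega), if_pos hs]
          simp [show ¬(x.2.2.2.1 < x.1 + x.2.1 - x.2.2.1) from by omega,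
                show ¬(x.1 + x.2.1 - x.2.2.1 < x.2.2.2.1) from by omega, hs]
        · rw [if_pos hs]
          simp [show x.2.2.2.1 < x.1 + x.2.1 - x.2.2.1 from by omega,
                show ¬(x.1 + x.2.1 - x.2.2.1 < x.2.2.2.1) from by omega,
                show x.1 + x.2.1 - x.2.2.1 - x.2.2.2.1 ≠ 0 from by omega]
      | x :: y :: t => simp only [List.length_cons] at h; omega
    · rw [pvSolve.eq_def, if_neg h]
      have hl : xs = xs.take (xs.length / 2) ++ xs.drop (xs.length / 2) :=
        (List.take_append_drop _ _).symm
      have h1 : pvSolve (xs.take (xs.length / 2)) = pvQuad (xs.take (xs.length / 2)) := by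
        refine ih (xs.take (xs.length / 2)).length ?_ _ rfl
        subst hn; simp only [List.length_take]; omega
      have h2 : pvSolve (xs.drop (xs.length / 2)) = pvQuad (xs.drop (xs.length / 2)) := by
        refine ih (xs.drop (xs.length / 2)).length ?_ _ rfl
        subst hn; simp only [List.length_drop]; omega
      conv_rhs => rw [hl, pvQuad_append]
      simp only [h1, h2]

theorem pv_foldl_items (xs : List (Int × Int × Int × Int × Int)) :
    ∀ a f r t : Int,
      (xs.foldl pvStepA (PySem.Dict.mk
        [("active", a), ("fail", f), ("reactive", r), ("total_rolls", t)])).items =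
      [("active", a + (pvQuad xs).1),
       ("fail",   f + (pvQuad xs).2.1),
       ("reactive", r + (pvQuad xs).2.2.1),
       ("total_rolls", t + (pvQuad xs).2.2.2)] := by
  induction xs with
  | nil => intro a f r t; simp [pvQuad]
  | cons x xs ih =>
    intro a f r t
    rcases lt_trichotomy (pvSquash x) 0 with h | h | h
    · have : pvStepA (PySem.Dict.mk
          [("active", a), ("fail", f), ("reactive", r), ("total_rolls", t)]) x =
          PySem.Dict.mk [("active", a), ("fail", f), ("reactive", r + x.2.2.2.2),
            ("total_rolls", t + x.2.2.2.2)] := by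
        simp only [pvStepA, pvSquash] at h ⊢
        rw [if_neg (by omega), if_neg (by omega), if_pos h]
        rfl
      simp only [List.foldl_cons, this, ih]
      have hg : decide (pvSquash x > 0) = false := by simp; omega
      have he : decide (pvSquash x = 0) = false := by simp; omega
      have hl : decide (pvSquash x < 0) = true := by simp; omega
      simp [pvQuad, hg, he, hl, add_assoc]
    · have : pvStepA (PySem.Dict.mk
          [("active", a), ("fail", f), ("reactive", r), ("total_rolls", t)]) x =
          PySem.Dict.mk [("active", a), ("fail", f + x.2.2.2.2), ("reactive", r),
            ("total_rolls", t + x.2.2.2.2)] := by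
        simp only [pvStepA, pvSquash] at h ⊢
        rw [if_pos h]
        rfl
      simp only [List.foldl_cons, this, ih]
      have hg : decide (pvSquash x > 0) = false := by simp; omega
      have he : decide (pvSquash x = 0) = true := by simp; omega
      have hl : decide (pvSquash x < 0) = false := by simp; omega
      simp [pvQuad, hg, he, hl, add_assoc]
    · have : pvStepA (PySem.Dict.mk
          [("active", a), ("fail", f), ("reactive", r), ("total_rolls", t)]) x =
          PySem.Dict.mk [("active", a + x.2.2.2.2), ("fail", f), ("reactive", r),
            ("total_rolls", t + x.2.2.2.2)] := by
        simp only [pvStepA, pvSquash] at h ⊢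
        rw [if_neg (by omega), if_pos h]
        rfl
      simp only [List.foldl_cons, this, ih]
      have hg : decide (pvSquash x > 0) = true := by simp; omega
      have he : decide (pvSquash x = 0) = false := by simp; omega
      have hl : decide (pvSquash x < 0) = false := by simp; omega
      simp [pvQuad, hg, he, hl, add_assoc]

-- ===== VERDICT (by name: the statement is the Claim_ definition above) =====
theorem face_to_face_result_spec : Claim_equal_face_to_face_result := by
  intro outcomes _
  unfold Spec_face_to_face_result face_to_face_result face_to_face_result_alt
  rw [pvSolve_eq_quad]
  have h := pv_foldl_items outcomes 0 0 0 0
  simp only [zero_add] at h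
  exact h.trans (by rfl)
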